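-- pv_equiv track=rewrite | github.com/ColdThunder11/nonebot-adapter-telegram | tools/models_genter.py | method_name_annotation_builder
-- ===== SOURCE A (Python) =====
-- def method_name_annotation_builder(html_text : str) -> str:
--     html_text = html_text.strip("\n")
--     plain_text = ""
--     left_count = 0
--     pointer = 0
--     while(pointer < len(html_text)):
--         char = html_text[pointer]
--         if char == "<" :
--             left_count += 1
--             pointer += 1
--             continue
--         elif char == ">":
--             left_count -= 1
--             pointer += 1
--             continue
--         else:
--             if left_count == 0:
--                 plain_text += char
--             pointer += 1
--             continue
--     return plain_text
-- ===== SOURCE B (Python) =====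
-- def method_name_annotation_builder(html_text : str) -> str:
--     html_text = html_text.strip("\n")
--     deltas = [1 if c == "<" else -1 if c == ">" else 0 for c in html_text]
--     balances = [0]
--     for d in deltas:
--         balances.append(balances[-1] + d)
--     return "".join(c for c, d, b in zip(html_text, deltas, balances) if d == 0 and b == 0)
-- ===== Notes on version B (the rewrite author's own statement) =====
-- stated objective: alternative
-- what changed: Replaces the inline pointer/counter emit loop by two separate passes: a delta list and an exclusive prefix-balance table are built first, then characters with delta 0 and preceding balance 0 are joined.
import Mathlib
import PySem

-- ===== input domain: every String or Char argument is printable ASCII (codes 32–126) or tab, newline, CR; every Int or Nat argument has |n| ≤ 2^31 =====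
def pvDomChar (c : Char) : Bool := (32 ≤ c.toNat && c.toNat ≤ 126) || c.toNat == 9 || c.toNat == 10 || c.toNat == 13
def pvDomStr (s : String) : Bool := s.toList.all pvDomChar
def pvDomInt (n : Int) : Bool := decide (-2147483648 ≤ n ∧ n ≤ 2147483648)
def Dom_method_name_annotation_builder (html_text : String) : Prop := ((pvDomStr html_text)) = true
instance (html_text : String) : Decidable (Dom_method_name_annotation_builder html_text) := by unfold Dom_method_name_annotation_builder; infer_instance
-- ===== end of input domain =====

-- B replaces the single counter-and-emit loop by a prefix-balance table plus a filtering pass (alternative decomposition, same result).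

-- ===== PORT A =====
-- the while loop of A: state is (plain_text, left_count), one step per character
def pvA_loop : List Char → String → Int → String
  | [], plain, _ => plain
  | c :: rest, plain, lc =>
    if c = '<' then pvA_loop rest plain (lc + 1)
    else if c = '>' then pvA_loop rest plain (lc - 1)
    else pvA_loop rest (if lc = 0 then plain.push c else plain) lc

def method_name_annotation_builder (html_text : String) : String :=
  pvA_loop (PySem.Str.stripChars html_text "\n").toList "" 0

-- ===== PORT B =====
def pvDelta (c : Char) : Int := if c = '<' then 1 else if c = '>' then -1 else 0

def method_name_annotation_builder_alt (html_text : String) : String :=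
  let l := (PySem.Str.stripChars html_text "\n").toList
  let ds := l.map pvDelta
  let bs := List.scanl (· + ·) (0 : Int) ds
  String.ofList (((l.zip (ds.zip bs)).filter (fun p => p.2.1 == 0 && p.2.2 == 0)).map (·.1))

-- ===== PRECONDITION & SPEC =====
def Spec_method_name_annotation_builder (html_text : String) (out : String) : Prop := out = method_name_annotation_builder_alt html_text
instance (html_text : String) (out : String) : Decidable (Spec_method_name_annotation_builder html_text out) := by unfold Spec_method_name_annotation_builder; infer_instance

-- ===== CLAIM (what is proved, stated in full; the proofs are below) =====
def Claim_equal_method_name_annotation_builder : Prop := ∀ (html_text : String), Dom_method_name_annotation_builder html_text → Spec_method_name_annotation_builder html_text (method_name_annotation_builder html_text)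

-- ===== LEMMAS AND PROOFS =====

lemma pvPush_ofList (s : String) (c : Char) (t : List Char) :
    s.push c ++ String.ofList t = s ++ String.ofList (c :: t) := by
  have h : s ++ String.ofList [c] = s.push c := (String.append_left_inj s).mp rfl
  rw [show (c :: t) = [c] ++ t from rfl, String.ofList_append, ← String.append_assoc, h]

lemma pvA_loop_eq (l : List Char) : ∀ (plain : String) (b : Int),
    pvA_loop l plain b =
      plain ++ String.ofList ((((l.zip ((l.map pvDelta).zip (List.scanl (· + ·) b (l.map pvDelta)))).filter
        (fun p => p.2.1 == 0 && p.2.2 == 0)).map (·.1))) := by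
  induction l with
  | nil =>
    intro plain b
    rw [pvA_loop]
    simp only [List.map_nil, List.scanl_nil, List.zip_nil_right, List.zip_nil_left,
      List.filter_nil, List.map_nil]
    rw [show String.ofList ([] : List Char) = "" from rfl, String.append_empty]
  | cons c rest ih =>
    intro plain b
    by_cases h1 : c = '<'
    · simp [pvA_loop, h1, pvDelta, ih]
    · by_cases h2 : c = '>'
      · simp [pvA_loop, h2, pvDelta, ih, sub_eq_add_neg]
      · by_cases hb : b = 0
        · rw [pvA_loop, if_neg h1, if_neg h2, if_pos hb, ih]
          simp [pvDelta, h1, h2, hb, pvPush_ofList]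
        · simp [pvA_loop, h1, h2, hb, pvDelta, ih]

-- ===== VERDICT (by name: the statement is the Claim_ definition above) =====
theorem method_name_annotation_builder_spec : Claim_equal_method_name_annotation_builder := by
  intro s _
  unfold Spec_method_name_annotation_builder method_name_annotation_builder method_name_annotation_builder_alt
  simp [pvA_loop_eq]
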